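-- pv_equiv track=rewrite | github.com/OttoAhlfors/Data-Structures-And-Algorithms | Week assingments/sales.py | sales
-- ===== SOURCE A (Python) =====
-- def sales(cars, customers) -> int:
--     sales = 0
--     #Laitetaan listat järjestykseen pienimmästä suurimpaan
--     cars.sort()
--     customers.sort()
--     #Käydään läpi asiakkaat ja autot
--     for i in customers:
--         for j in cars:
--             #Jos auto on pienempi tai yhtä suuri kuin asiakas, myydään auto
--             if j <= i:
--                 sales = sales + 1
--                 #Poistetaan auto listasta jotta sitä ei myydä uudelleen
--                 cars.remove(j)
--                 break
--
--     return sales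
-- ===== SOURCE B (Python) =====
-- def sales(cars, customers) -> int:
--     # Sort copies; walk both sorted lists once with an index into the cars.
--     cs = sorted(cars)
--     i = 0
--     count = 0
--     for k in sorted(customers):
--         if i < len(cs) and cs[i] <= k:
--             count += 1
--             i += 1
--     return count
-- ===== Notes on version B (the rewrite author's own statement) =====
-- stated objective: faster
-- what changed: Replaces the per-customer inner scan with list.remove (O(n*m) after sorting) by a single two-pointer pass over the two sorted lists; since both lists are sorted, A's inner loop always sells the smallest remaining car, which is exactly what the pointer tracks.
import Mathlib
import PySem

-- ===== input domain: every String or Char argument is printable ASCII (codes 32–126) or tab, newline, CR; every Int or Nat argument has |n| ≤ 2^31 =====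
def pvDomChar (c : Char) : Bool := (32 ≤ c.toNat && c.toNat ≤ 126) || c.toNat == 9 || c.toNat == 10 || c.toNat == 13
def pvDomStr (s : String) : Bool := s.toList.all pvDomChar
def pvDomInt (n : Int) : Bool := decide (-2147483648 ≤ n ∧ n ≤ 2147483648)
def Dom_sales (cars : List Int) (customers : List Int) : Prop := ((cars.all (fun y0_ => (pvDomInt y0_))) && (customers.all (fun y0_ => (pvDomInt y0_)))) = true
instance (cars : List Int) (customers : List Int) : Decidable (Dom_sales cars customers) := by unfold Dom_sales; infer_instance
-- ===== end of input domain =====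

-- B replaces A's per-customer inner scan over the remaining cars (with list.remove)
-- by a single two-pointer pass over the two sorted lists; return-value equivalence only
-- (A sorts and pops from its argument lists in place, B leaves them untouched).


-- ===== PORT A =====
-- inner 'for j in cars: if j <= i: … break' — first car ≤ i, scanning in list order
def salesFindCar : List Int → Int → Option Int
  | [], _ => none
  | j :: rest, i => if j ≤ i then some j else salesFindCar rest i

-- one iteration of the outer loop: sell the found car (remove it, count += 1) or do nothing
def salesStep (st : List Int × Int) (i : Int) : List Int × Int :=
  match salesFindCar st.1 i with
  | some j => ((PySem.List.remove? st.1 j).getD st.1, st.2 + 1)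
  | none => st

def sales (cars : List Int) (customers : List Int) : Int :=
  let cars := PySem.List.sorted cars (fun x => x) false
  let customers := PySem.List.sorted customers (fun x => x) false
  (customers.foldl salesStep (cars, 0)).2

-- ===== PORT B =====
-- two-pointer scan: the index into the sorted cars is represented by consuming the list's front
def salesTwoPtr : List Int → List Int → Int
  | _, [] => 0
  | [], _ :: ks => salesTwoPtr [] ks
  | c :: cs, k :: ks => if c ≤ k then 1 + salesTwoPtr cs ks else salesTwoPtr (c :: cs) ks

def sales_alt (cars : List Int) (customers : List Int) : Int :=
  salesTwoPtr (PySem.List.sorted cars (fun x => x) false)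
              (PySem.List.sorted customers (fun x => x) false)

-- ===== PRECONDITION & SPEC =====
def Spec_sales (cars : List Int) (customers : List Int) (out : Int) : Prop := out = sales_alt cars customers
instance (cars : List Int) (customers : List Int) (out : Int) : Decidable (Spec_sales cars customers out) := by unfold Spec_sales; infer_instance

-- ===== CLAIM (what is proved, stated in full; the proofs are below) =====
def Claim_equal_sales : Prop := ∀ (cars : List Int) (customers : List Int), Dom_sales cars customers → Spec_sales cars customers (sales cars customers)

-- ===== LEMMAS AND PROOFS =====
theorem salesFindCar_none (cs : List Int) (k : Int)
    (h : ∀ x ∈ cs, ¬ x ≤ k) : salesFindCar cs k = none := by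
  induction cs with
  | nil => rfl
  | cons c cs ih =>
    simp only [salesFindCar, if_neg (h c (by simp))]
    exact ih (fun x hx => h x (by simp [hx]))

-- A's fold over sorted cars counts exactly what the two-pointer scan counts
theorem foldl_salesStep_eq (ks : List Int) :
    ∀ (cs : List Int) (s : Int), cs.Pairwise (· ≤ ·) →
    (ks.foldl salesStep (cs, s)).2 = s + salesTwoPtr cs ks := by
  induction ks with
  | nil => intro cs s _; simp [salesTwoPtr]
  | cons k ks ih =>
    intro cs s hp
    cases cs with
    | nil =>
      simp only [List.foldl_cons, salesStep, salesFindCar, salesTwoPtr]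
      exact ih [] s hp
    | cons c cs =>
      by_cases hck : c ≤ k
      · have hstep : salesStep (c :: cs, s) k = (cs, s + 1) := by
          simp [salesStep, salesFindCar, if_pos hck]
        rw [List.foldl_cons, hstep, ih cs (s + 1) (List.Pairwise.of_cons hp)]
        simp [salesTwoPtr, if_pos hck]; ring
      · have hnone : salesFindCar (c :: cs) k = none := by
          refine salesFindCar_none _ _ ?_
          intro x hx
          rcases List.mem_cons.mp hx with rfl | hx
          · exact hck
          · have := (List.pairwise_cons.mp hp).1 x hx
            omega
        have hstep : salesStep (c :: cs, s) k = (c :: cs, s) := by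
          simp [salesStep, hnone]
        rw [List.foldl_cons, hstep, ih (c :: cs) s hp]
        simp [salesTwoPtr, if_neg hck]

-- ===== VERDICT (by name: the statement is the Claim_ definition above) =====
theorem sales_spec : Claim_equal_sales := by
  intro cars customers _
  unfold Spec_sales sales sales_alt
  have hp : (PySem.List.sorted cars (fun x => x) false).Pairwise (· ≤ ·) := by
    simpa using PySem.List.sorted_pairwise (xs := cars) (key := fun x => x)
  simpa using foldl_salesStep_eq (PySem.List.sorted customers (fun x => x) false)
    (PySem.List.sorted cars (fun x => x) false) 0 hp
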